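-- pv_equiv track=rewrite | github.com/um-computacion-tm/ajedrez-2024-santiescu | game/pieces.py | possible_moves_gen
-- ===== SOURCE A (Python) =====
-- def possible_moves_gen(fila_inicio, columna_inicio, direcciones, one_step=False):
--     movimientos = []
--     for direccion in direcciones:
--         nueva_fila, nueva_columna = fila_inicio, columna_inicio
--         while True:
--             nueva_fila += direccion[0]
--             nueva_columna += direccion[1]
--             if 0 <= nueva_fila < 8 and 0 <= nueva_columna < 8:
--                 movimientos.append((nueva_fila, nueva_columna))
--                 if one_step:
--                     break
--             else:
--                 break
--     return movimientos
-- ===== SOURCE B (Python) =====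
-- def _axis_bounds(p, d):
--     # Interval (lo, hi) of step counts k with 0 <= p + k*d < 8;
--     # None means the axis imposes no constraint (d == 0 with p on the board).
--     if d == 0:
--         return None if 0 <= p < 8 else (1, 0)
--     if d > 0:
--         return (-(p // d), (7 - p) // d)
--     return (-((7 - p) // (-d)), p // (-d))
--
-- def possible_moves_gen(fila_inicio, columna_inicio, direcciones, one_step=False):
--     movimientos = []
--     for dr, dc in direcciones:
--         lo, hi = 1, 8  # at most 8 consecutive steps ever fit on an 8-wide board
--         for b in (_axis_bounds(fila_inicio, dr), _axis_bounds(columna_inicio, dc)):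
--             if b is not None:
--                 lo = max(lo, b[0])
--                 hi = min(hi, b[1])
--         steps = hi if lo <= 1 else 0
--         if one_step and steps > 1:
--             steps = 1
--         movimientos.extend((fila_inicio + k * dr, columna_inicio + k * dc)
--                            for k in range(1, steps + 1))
--     return movimientos
-- ===== Notes on version B (the rewrite author's own statement) =====
-- stated objective: alternative
-- what changed: Replaces the incremental square-by-square while-walk with a closed-form per-direction step count: each axis yields an interval of admissible step numbers via floor division, the intervals are intersected and capped, and the moves are emitted by a single range-driven comprehension.
import Mathlib
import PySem

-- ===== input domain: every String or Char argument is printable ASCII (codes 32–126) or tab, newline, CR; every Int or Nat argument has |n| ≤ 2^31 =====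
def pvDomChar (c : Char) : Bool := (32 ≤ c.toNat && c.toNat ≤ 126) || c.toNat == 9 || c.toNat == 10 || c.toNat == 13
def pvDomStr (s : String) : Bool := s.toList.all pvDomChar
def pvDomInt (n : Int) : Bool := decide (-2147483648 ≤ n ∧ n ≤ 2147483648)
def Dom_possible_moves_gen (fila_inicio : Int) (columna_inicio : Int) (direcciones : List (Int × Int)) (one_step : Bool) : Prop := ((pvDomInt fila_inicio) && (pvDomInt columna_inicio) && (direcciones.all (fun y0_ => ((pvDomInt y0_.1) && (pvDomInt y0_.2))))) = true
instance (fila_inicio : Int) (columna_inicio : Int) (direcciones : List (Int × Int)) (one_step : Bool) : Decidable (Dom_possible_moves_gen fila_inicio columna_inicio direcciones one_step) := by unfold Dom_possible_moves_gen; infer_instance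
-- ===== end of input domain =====

-- B replaces A's square-by-square while-walk with a closed-form per-direction step count
-- (per-axis intervals of admissible step numbers, intersected) and a range comprehension.

-- ===== PORT A =====
-- A's 'while True' loop. Fuel 9 is exact: whenever the Python loop terminates it runs at
-- most 9 iterations (at most 8 in-bounds appends on an 8-wide board plus the breaking one);
-- the only non-terminating inputs (direction (0,0), start on the board, one_step false)
-- are excluded by Pre_possible_moves_gen below.
def pvLoopA (dr dc : Int) (one_step : Bool) : Nat → Int → Int → List (Int × Int) → List (Int × Int)
  | 0, _, _, movimientos => movimientos
  | fuel+1, f, c, movimientos =>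
    let nf := f + dr
    let nc := c + dc
    if 0 ≤ nf ∧ nf < 8 ∧ 0 ≤ nc ∧ nc < 8 then
      if one_step then movimientos ++ [(nf, nc)]
      else pvLoopA dr dc one_step fuel nf nc (movimientos ++ [(nf, nc)])
    else movimientos

def possible_moves_gen (fila_inicio : Int) (columna_inicio : Int) (direcciones : List (Int × Int)) (one_step : Bool) : List (Int × Int) :=
  direcciones.foldl (fun movimientos d => pvLoopA d.1 d.2 one_step 9 fila_inicio columna_inicio movimientos) []

-- ===== PORT B =====
-- interval (lo, hi) of step counts k with 0 ≤ p + k*d < 8; none = axis imposes no constraint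
def pvAxisBounds (p d : Int) : Option (Int × Int) :=
  if d = 0 then (if 0 ≤ p ∧ p < 8 then none else some (1, 0))
  else if 0 < d then some (-(PySem.Int.floordiv p d), PySem.Int.floordiv (7 - p) d)
  else some (-(PySem.Int.floordiv (7 - p) (-d)), PySem.Int.floordiv p (-d))

def pvDirMoves (f c dr dc : Int) (one_step : Bool) : List (Int × Int) :=
  let lh := [pvAxisBounds f dr, pvAxisBounds c dc].foldl
      (fun (lh : Int × Int) b => match b with
        | none => lh
        | some (l, h) => (max lh.1 l, min lh.2 h)) (1, 8)
  let steps := if lh.1 ≤ 1 then lh.2 else 0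
  let steps := if one_step ∧ steps > 1 then 1 else steps
  (PySem.List.pyRange 1 (steps + 1) 1).map (fun k => (f + k * dr, c + k * dc))

def possible_moves_gen_alt (fila_inicio : Int) (columna_inicio : Int) (direcciones : List (Int × Int)) (one_step : Bool) : List (Int × Int) :=
  direcciones.foldl (fun movimientos d => movimientos ++ pvDirMoves fila_inicio columna_inicio d.1 d.2 one_step) []

-- ===== PRECONDITION & SPEC =====
-- Pre_ excludes exactly the inputs on which A never returns: with a (0,0) direction, the
-- start square on the board and one_step false, A's 'while True' loop spins forever.
def Pre_possible_moves_gen (fila_inicio : Int) (columna_inicio : Int) (direcciones : List (Int × Int)) (one_step : Bool) : Prop :=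
  (0, 0) ∈ direcciones → (0 ≤ fila_inicio ∧ fila_inicio < 8 ∧ 0 ≤ columna_inicio ∧ columna_inicio < 8) → one_step = true

instance (fila_inicio : Int) (columna_inicio : Int) (direcciones : List (Int × Int)) (one_step : Bool) : Decidable (Pre_possible_moves_gen fila_inicio columna_inicio direcciones one_step) := by unfold Pre_possible_moves_gen; infer_instance

def pvWitness_possible_moves_gen : Int × Int × (List (Int × Int)) × Bool := (0, 0, [(1, 1), (0, -1)], false)

def Spec_possible_moves_gen (fila_inicio : Int) (columna_inicio : Int) (direcciones : List (Int × Int)) (one_step : Bool) (out : List (Int × Int)) : Prop := out = possible_moves_gen_alt fila_inicio columna_inicio direcciones one_step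
instance (fila_inicio : Int) (columna_inicio : Int) (direcciones : List (Int × Int)) (one_step : Bool) (out : List (Int × Int)) : Decidable (Spec_possible_moves_gen fila_inicio columna_inicio direcciones one_step out) := by unfold Spec_possible_moves_gen; infer_instance

-- ===== CLAIM (what is proved, stated in full; the proofs are below) =====
def Claim_equal_possible_moves_gen : Prop := ∀ (fila_inicio : Int) (columna_inicio : Int) (direcciones : List (Int × Int)) (one_step : Bool), Dom_possible_moves_gen fila_inicio columna_inicio direcciones one_step → Pre_possible_moves_gen fila_inicio columna_inicio direcciones one_step → Spec_possible_moves_gen fila_inicio columna_inicio direcciones one_step (possible_moves_gen fila_inicio columna_inicio direcciones one_step)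

-- ===== LEMMAS AND PROOFS =====

-- the loop's in-bounds test after k steps in direction (dr, dc)
def pvInb (f c dr dc k : Int) : Prop :=
  0 ≤ f + k * dr ∧ f + k * dr < 8 ∧ 0 ≤ c + k * dc ∧ c + k * dc < 8

lemma pvInb_one (f c dr dc : Int) :
    pvInb f c dr dc 1 ↔ (0 ≤ f + dr ∧ f + dr < 8 ∧ 0 ≤ c + dc ∧ c + dc < 8) := by
  unfold pvInb; rw [one_mul, one_mul]

lemma pvInb_shift (f c dr dc k : Int) :
    pvInb (f + dr) (c + dc) dr dc k ↔ pvInb f c dr dc (k + 1) := by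
  unfold pvInb
  have e1 : (k + 1) * dr = k * dr + dr := by ring
  have e2 : (k + 1) * dc = k * dc + dc := by ring
  rw [e1, e2]
  omega

lemma pv_axis_none {p d : Int} (h : pvAxisBounds p d = none) : d = 0 ∧ 0 ≤ p ∧ p < 8 := by
  unfold pvAxisBounds at h
  by_cases hd0 : d = 0
  · by_cases hin : 0 ≤ p ∧ p < 8
    · exact ⟨hd0, hin.1, hin.2⟩
    · rw [if_pos hd0, if_neg hin] at h
      exact absurd h (by simp)
  · by_cases hpos : 0 < d <;>
      [rw [if_neg hd0, if_pos hpos] at h; rw [if_neg hd0, if_neg hpos] at h] <;>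
      exact absurd h (by simp)

lemma pv_axis_some {p d l h : Int} (hs : pvAxisBounds p d = some (l, h)) (k : Int) :
    (0 ≤ p + k * d ∧ p + k * d < 8) ↔ (l ≤ k ∧ k ≤ h) := by
  unfold pvAxisBounds at hs
  by_cases hd0 : d = 0
  · subst hd0
    by_cases hin : 0 ≤ p ∧ p < 8
    · rw [if_pos rfl, if_pos hin] at hs
      exact absurd hs (by simp)
    · rw [if_pos rfl, if_neg hin] at hs
      simp only [Option.some.injEq, Prod.mk.injEq] at hs
      obtain ⟨hl, hh⟩ := hs
      simp only [mul_zero, add_zero]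
      omega
  · by_cases hpos : 0 < d
    · rw [if_neg hd0, if_pos hpos] at hs
      simp only [Option.some.injEq, Prod.mk.injEq] at hs
      obtain ⟨hl, hh⟩ := hs
      have e1 := PySem.Int.le_floordiv_iff_mul_le (a := 7 - p) (b := d) (q := k) hpos
      have e2 := PySem.Int.le_floordiv_iff_mul_le (a := p) (b := d) (q := -k) hpos
      have e3 : (-k) * d = -(k * d) := by ring
      rw [e3] at e2
      subst hl hh
      omega
    · have hneg : 0 < -d := by omega
      rw [if_neg hd0, if_neg hpos] at hs
      simp only [Option.some.injEq, Prod.mk.injEq] at hs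
      obtain ⟨hl, hh⟩ := hs
      have e1 := PySem.Int.le_floordiv_iff_mul_le (a := p) (b := -d) (q := k) hneg
      have e2 := PySem.Int.le_floordiv_iff_mul_le (a := 7 - p) (b := -d) (q := -k) hneg
      have e3 : k * (-d) = -(k * d) := by ring
      have e4 : (-k) * (-d) = k * d := by ring
      rw [e3] at e1; rw [e4] at e2
      subst hl hh
      omega

lemma pv_axis_some_bound {p d l h : Int} (hs : pvAxisBounds p d = some (l, h)) (hl : l ≤ 1) : h ≤ 8 := by
  unfold pvAxisBounds at hs
  by_cases hd0 : d = 0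
  · subst hd0
    by_cases hin : 0 ≤ p ∧ p < 8
    · rw [if_pos rfl, if_pos hin] at hs
      exact absurd hs (by simp)
    · rw [if_pos rfl, if_neg hin] at hs
      simp only [Option.some.injEq, Prod.mk.injEq] at hs
      omega
  · by_cases hpos : 0 < d
    · rw [if_neg hd0, if_pos hpos] at hs
      simp only [Option.some.injEq, Prod.mk.injEq] at hs
      obtain ⟨hle, hhe⟩ := hs
      have e2 := PySem.Int.le_floordiv_iff_mul_le (a := p) (b := d) (q := -1) hpos
      have e1 := PySem.Int.floordiv_lt_iff_lt_mul (a := 7 - p) (b := d) (q := 9) hpos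
      have e3 : (-1 : Int) * d = -d := by ring
      rw [e3] at e2
      subst hle hhe
      omega
    · have hneg : 0 < -d := by omega
      rw [if_neg hd0, if_neg hpos] at hs
      simp only [Option.some.injEq, Prod.mk.injEq] at hs
      obtain ⟨hle, hhe⟩ := hs
      have e2 := PySem.Int.le_floordiv_iff_mul_le (a := 7 - p) (b := -d) (q := -1) hneg
      have e1 := PySem.Int.floordiv_lt_iff_lt_mul (a := p) (b := -d) (q := 9) hneg
      have e3 : (-1 : Int) * (-d) = d := by ring
      rw [e3] at e2
      subst hle hhe
      omega

-- A's per-direction steps count as B computes it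
def pvSteps (lo hi : Int) (one_step : Bool) : Int :=
  if one_step ∧ (if lo ≤ 1 then hi else 0) > 1 then 1
  else (if lo ≤ 1 then hi else 0)

lemma pv_pyRange_empty {a b : Int} (h : b ≤ a) : PySem.List.pyRange a b 1 = [] := by
  rw [PySem.List.pyRange_one]
  have : (b - a).toNat = 0 := by omega
  rw [this]; rfl

-- the walk, one_step = false: n in-bounds steps then a breaking one
lemma pv_walk (dr dc : Int) (n : Nat) :
    ∀ (f c : Int) (fuel : Nat) (mov : List (Int × Int)), n < fuel →
    (∀ k : Int, 1 ≤ k → k ≤ (n : Int) → pvInb f c dr dc k) →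
    ¬ pvInb f c dr dc ((n : Int) + 1) →
    pvLoopA dr dc false fuel f c mov = mov ++ (PySem.List.pyRange 1 ((n : Int) + 1) 1).map (fun k => (f + k * dr, c + k * dc)) := by
  induction n with
  | zero =>
    intro f c fuel mov hfuel _ hout
    obtain ⟨m, rfl⟩ : ∃ m, fuel = m + 1 := ⟨fuel - 1, by omega⟩
    rw [pvLoopA]
    rw [if_neg (by
      intro hcon
      apply hout
      rw [show ((0 : Nat) : Int) + 1 = 1 by norm_num, pvInb_one]
      exact hcon)]
    rw [pv_pyRange_empty (by norm_num)]
    simp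
  | succ n ih =>
    intro f c fuel mov hfuel hin hout
    obtain ⟨m, rfl⟩ : ∃ m, fuel = m + 1 := ⟨fuel - 1, by omega⟩
    rw [pvLoopA]
    rw [if_pos (by
      have h1 := hin 1 (by norm_num) (by push_cast; omega)
      exact (pvInb_one f c dr dc).1 h1)]
    simp only [Bool.false_eq_true, if_false]
    rw [ih (f + dr) (c + dc) m (mov ++ [(f + dr, c + dc)]) (by omega)
      (by
        intro k hk1 hk2
        rw [pvInb_shift]
        exact hin (k + 1) (by omega) (by push_cast; omega))
      (by
        rw [pvInb_shift]
        intro hcon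
        apply hout
        rw [show ((n + 1 : Nat) : Int) + 1 = ((n : Int) + 1) + 1 by push_cast; ring]
        exact hcon)]
    rw [List.append_assoc]
    congr 1
    rw [PySem.List.pyRange_one, PySem.List.pyRange_one]
    have hn1 : ((n : Int) + 1 - 1).toNat = n := by omega
    have hn2 : (((n + 1 : Nat) : Int) + 1 - 1).toNat = n + 1 := by omega
    rw [hn1, hn2, List.range_succ_eq_map]
    simp only [List.map_cons, List.map_map, List.cons_append, List.nil_append]
    congr 1
    · norm_num
    · apply List.map_congr_left
      intro j _
      simp only [Function.comp, Prod.mk.injEq]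
      constructor <;> · push_cast; ring

-- the walk, one_step = true
lemma pv_walk1 (dr dc f c : Int) (mov : List (Int × Int)) :
    pvLoopA dr dc true 9 f c mov =
      mov ++ (if 0 ≤ f + dr ∧ f + dr < 8 ∧ 0 ≤ c + dc ∧ c + dc < 8 then [(f + dr, c + dc)] else []) := by
  rw [pvLoopA]
  by_cases h : 0 ≤ f + dr ∧ f + dr < 8 ∧ 0 ≤ c + dc ∧ c + dc < 8
  · rw [if_pos h, if_pos h]
    simp
  · rw [if_neg h, if_neg h]
    simp

-- abstract glue: from interval facts about (lo, hi) to the loop/closed-form equality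
lemma pv_glue (dr dc f c lo hi : Int) (one_step : Bool) (mov : List (Int × Int))
    (Hin : ∀ k : Int, lo ≤ k → k ≤ hi → 1 ≤ k → pvInb f c dr dc k)
    (Hout : one_step = false → lo ≤ 1 → 1 ≤ hi → ¬ pvInb f c dr dc (hi + 1))
    (H0 : (1 < lo ∨ hi < 1) → ¬ pvInb f c dr dc 1)
    (Hhi : one_step = false → lo ≤ 1 → 1 ≤ hi → hi ≤ 8) :
    pvLoopA dr dc one_step 9 f c mov =
      mov ++ (PySem.List.pyRange 1 (pvSteps lo hi one_step + 1) 1).map (fun k => (f + k * dr, c + k * dc)) := by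
  by_cases hlo : lo ≤ 1
  · by_cases hhi : 1 ≤ hi
    · cases one_step with
      | true =>
        rw [pv_walk1]
        have hsteps : pvSteps lo hi true = 1 := by
          unfold pvSteps
          rw [if_pos hlo]
          by_cases hgt : 1 < hi
          · rw [if_pos ⟨rfl, hgt⟩]
          · rw [if_neg (fun hc => hgt hc.2)]
            omega
        rw [hsteps]
        rw [if_pos ((pvInb_one f c dr dc).1 (Hin 1 hlo hhi le_rfl))]
        congr 1
        rw [show (1 : Int) + 1 = 2 from rfl, PySem.List.pyRange_one]
        norm_num
      | false =>
        have hle8 : hi ≤ 8 := Hhi rfl hlo hhi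
        have hn : ((hi.toNat : Int)) = hi := by omega
        have hsteps : pvSteps lo hi false = hi := by
          unfold pvSteps
          rw [if_pos hlo, if_neg (fun hc => Bool.false_ne_true hc.1)]
        rw [hsteps]
        rw [pv_walk dr dc hi.toNat f c 9 mov (by omega)
          (by intro k hk1 hk2; exact Hin k (by omega) (by omega) hk1)
          (by rw [hn]; exact Hout rfl hlo hhi)]
        rw [hn]
    · have hnone := H0 (Or.inr (by omega))
      have hempty : PySem.List.pyRange 1 (pvSteps lo hi one_step + 1) 1 = [] := by
        apply pv_pyRange_empty
        unfold pvSteps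
        rw [if_pos hlo, if_neg (fun hc => absurd hc.2 (by omega))]
        omega
      rw [hempty]
      cases one_step with
      | true => rw [pv_walk1, if_neg (fun hc => hnone ((pvInb_one f c dr dc).2 hc))]; simp
      | false =>
        rw [pv_walk dr dc 0 f c 9 mov (by omega) (by intro k hk1 hk2; omega)
          (by rw [show ((0 : Nat) : Int) + 1 = 1 by norm_num]; exact hnone)]
        rw [show ((0 : Nat) : Int) + 1 = 1 by norm_num, pv_pyRange_empty (by norm_num)]
  · have hnone := H0 (Or.inl (by omega))
    have hempty : PySem.List.pyRange 1 (pvSteps lo hi one_step + 1) 1 = [] := by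
      apply pv_pyRange_empty
      unfold pvSteps
      rw [if_neg hlo, if_neg (fun hc => absurd hc.2 (by omega))]
      omega
    rw [hempty]
    cases one_step with
    | true => rw [pv_walk1, if_neg (fun hc => hnone ((pvInb_one f c dr dc).2 hc))]; simp
    | false =>
      rw [pv_walk dr dc 0 f c 9 mov (by omega) (by intro k hk1 hk2; omega)
        (by rw [show ((0 : Nat) : Int) + 1 = 1 by norm_num]; exact hnone)]
      rw [show ((0 : Nat) : Int) + 1 = 1 by norm_num, pv_pyRange_empty (by norm_num)]

-- per direction: the walk equals B's closed-form move list
lemma pv_dir (f c dr dc : Int) (one_step : Bool) (mov : List (Int × Int))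
    (hP : dr = 0 ∧ dc = 0 → (0 ≤ f ∧ f < 8 ∧ 0 ≤ c ∧ c < 8) → one_step = true) :
    pvLoopA dr dc one_step 9 f c mov = mov ++ pvDirMoves f c dr dc one_step := by
  rcases hb1 : pvAxisBounds f dr with _ | ⟨l1, h1⟩ <;> rcases hb2 : pvAxisBounds c dc with _ | ⟨l2, h2⟩
  · obtain ⟨hdr, hf1, hf2⟩ := pv_axis_none hb1
    obtain ⟨hdc, hc1, hc2⟩ := pv_axis_none hb2
    have hone : one_step = true := hP ⟨hdr, hdc⟩ ⟨hf1, hf2, hc1, hc2⟩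
    subst hdr hdc hone
    have hmv : pvDirMoves f c 0 0 true = (PySem.List.pyRange 1 (pvSteps 1 8 true + 1) 1).map (fun k => (f + k * 0, c + k * 0)) := by
      simp only [pvDirMoves, pvSteps, hb1, hb2, List.foldl]
    rw [hmv]
    apply pv_glue
    · intro k _ _ _
      unfold pvInb
      simp only [mul_zero, add_zero]
      omega
    · intro h; exact absurd h (by decide)
    · intro h; omega
    · intro h; exact absurd h (by decide)
  · obtain ⟨hdr, hf1, hf2⟩ := pv_axis_none hb1
    subst hdr
    have hmv : pvDirMoves f c 0 dc one_step = (PySem.List.pyRange 1 (pvSteps (max 1 l2) (min 8 h2) one_step + 1) 1).map (fun k => (f + k * 0, c + k * dc)) := by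
      simp only [pvDirMoves, pvSteps, hb1, hb2, List.foldl]
    rw [hmv]
    apply pv_glue
    · intro k hk1 hk2 hk3
      have := (pv_axis_some hb2 k).2 ⟨by omega, by omega⟩
      unfold pvInb
      simp only [mul_zero, add_zero]
      omega
    · intro _ hlo hhi hcon
      unfold pvInb at hcon
      have hx := (pv_axis_some hb2 (min 8 h2 + 1)).1 ⟨hcon.2.2.1, hcon.2.2.2⟩
      have hb := pv_axis_some_bound hb2 (by omega)
      omega
    · intro hc hcon
      unfold pvInb at hcon
      have hx := (pv_axis_some hb2 1).1 ⟨hcon.2.2.1, hcon.2.2.2⟩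
      omega
    · intro _ hlo _
      have hb := pv_axis_some_bound hb2 (by omega)
      omega
  · obtain ⟨hdc, hc1, hc2⟩ := pv_axis_none hb2
    subst hdc
    have hmv : pvDirMoves f c dr 0 one_step = (PySem.List.pyRange 1 (pvSteps (max 1 l1) (min 8 h1) one_step + 1) 1).map (fun k => (f + k * dr, c + k * 0)) := by
      simp only [pvDirMoves, pvSteps, hb1, hb2, List.foldl]
    rw [hmv]
    apply pv_glue
    · intro k hk1 hk2 hk3
      have := (pv_axis_some hb1 k).2 ⟨by omega, by omega⟩
      unfold pvInb
      simp only [mul_zero, add_zero]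
      omega
    · intro _ hlo hhi hcon
      unfold pvInb at hcon
      have hx := (pv_axis_some hb1 (min 8 h1 + 1)).1 ⟨hcon.1, hcon.2.1⟩
      have hb := pv_axis_some_bound hb1 (by omega)
      omega
    · intro hc hcon
      unfold pvInb at hcon
      have hx := (pv_axis_some hb1 1).1 ⟨hcon.1, hcon.2.1⟩
      omega
    · intro _ hlo _
      have hb := pv_axis_some_bound hb1 (by omega)
      omega
  · have hmv : pvDirMoves f c dr dc one_step = (PySem.List.pyRange 1 (pvSteps (max (max 1 l1) l2) (min (min 8 h1) h2) one_step + 1) 1).map (fun k => (f + k * dr, c + k * dc)) := by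
      simp only [pvDirMoves, pvSteps, hb1, hb2, List.foldl]
    rw [hmv]
    apply pv_glue
    · intro k hk1 hk2 hk3
      have e1 := (pv_axis_some hb1 k).2 ⟨by omega, by omega⟩
      have e2 := (pv_axis_some hb2 k).2 ⟨by omega, by omega⟩
      unfold pvInb
      omega
    · intro _ hlo hhi hcon
      unfold pvInb at hcon
      have hx1 := (pv_axis_some hb1 (min (min 8 h1) h2 + 1)).1 ⟨hcon.1, hcon.2.1⟩
      have hx2 := (pv_axis_some hb2 (min (min 8 h1) h2 + 1)).1 ⟨hcon.2.2.1, hcon.2.2.2⟩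
      have hc1 := pv_axis_some_bound hb1 (by omega)
      have hc2 := pv_axis_some_bound hb2 (by omega)
      omega
    · intro hc hcon
      unfold pvInb at hcon
      have hx1 := (pv_axis_some hb1 1).1 ⟨hcon.1, hcon.2.1⟩
      have hx2 := (pv_axis_some hb2 1).1 ⟨hcon.2.2.1, hcon.2.2.2⟩
      omega
    · intro _ hlo _
      have hc1 := pv_axis_some_bound hb1 (by omega)
      have hc2 := pv_axis_some_bound hb2 (by omega)
      omega

lemma pv_fold (f c : Int) (one_step : Bool) (dirs : List (Int × Int)) (mov : List (Int × Int))
    (hP : (0, 0) ∈ dirs → (0 ≤ f ∧ f < 8 ∧ 0 ≤ c ∧ c < 8) → one_step = true) :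
    dirs.foldl (fun movimientos d => pvLoopA d.1 d.2 one_step 9 f c movimientos) mov =
    dirs.foldl (fun movimientos d => movimientos ++ pvDirMoves f c d.1 d.2 one_step) mov := by
  induction dirs generalizing mov with
  | nil => rfl
  | cons d rest ih =>
    simp only [List.foldl_cons]
    rw [pv_dir f c d.1 d.2 one_step mov (by
      intro hd hin
      exact hP (by
        rcases d with ⟨a, b⟩
        simp only at hd
        obtain ⟨rfl, rfl⟩ := hd
        exact List.mem_cons_self) hin)]
    exact ih _ (fun hm hin => hP (List.mem_cons_of_mem _ hm) hin)

-- ===== VERDICT (by name: the statement is the Claim_ definition above) =====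
theorem possible_moves_gen_spec : Claim_equal_possible_moves_gen := by
  intro f c dirs one_step _ hPre
  unfold Spec_possible_moves_gen possible_moves_gen possible_moves_gen_alt
  exact pv_fold f c one_step dirs [] hPre
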